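-- pv_equiv track=rewrite | github.com/AILAB-CEFET-RJ/nerdd | src/tools/build_llm_adjudication_input.py | _tokens_are_subsequence
-- ===== SOURCE A (Python) =====
-- def _tokens_are_subsequence(needle_tokens: list[str], haystack_tokens: list[str]) -> bool:
--     if not needle_tokens or len(needle_tokens) > len(haystack_tokens):
--         return False
--     window = len(needle_tokens)
--     for start in range(len(haystack_tokens) - window + 1):
--         if haystack_tokens[start : start + window] == needle_tokens:
--             return True
--     return False
-- ===== SOURCE B (Python) =====
-- def _tokens_are_subsequence(needle_tokens: list[str], haystack_tokens: list[str]) -> bool: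
--     if not needle_tokens:
--         return False
--     w = len(needle_tokens)
--     m = len(haystack_tokens)
--     first = needle_tokens[0]
--     for start, tok in enumerate(haystack_tokens):
--         if tok != first:
--             continue
--         j = 1
--         while j < w and start + j < m and haystack_tokens[start + j] == needle_tokens[j]:
--             j += 1
--         if j == w:
--             return True
--     return False
-- ===== Notes on version B (the rewrite author's own statement) =====
-- stated objective: alternative
-- what changed: Replaces A's sliding-window loop that allocates and compares a fresh w-element slice at every start position with a single enumerate scan that filters candidate starts by the first token and verifies a match token-by-token with early exit, with no slicing and no upfront length guard.
import Mathlib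
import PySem

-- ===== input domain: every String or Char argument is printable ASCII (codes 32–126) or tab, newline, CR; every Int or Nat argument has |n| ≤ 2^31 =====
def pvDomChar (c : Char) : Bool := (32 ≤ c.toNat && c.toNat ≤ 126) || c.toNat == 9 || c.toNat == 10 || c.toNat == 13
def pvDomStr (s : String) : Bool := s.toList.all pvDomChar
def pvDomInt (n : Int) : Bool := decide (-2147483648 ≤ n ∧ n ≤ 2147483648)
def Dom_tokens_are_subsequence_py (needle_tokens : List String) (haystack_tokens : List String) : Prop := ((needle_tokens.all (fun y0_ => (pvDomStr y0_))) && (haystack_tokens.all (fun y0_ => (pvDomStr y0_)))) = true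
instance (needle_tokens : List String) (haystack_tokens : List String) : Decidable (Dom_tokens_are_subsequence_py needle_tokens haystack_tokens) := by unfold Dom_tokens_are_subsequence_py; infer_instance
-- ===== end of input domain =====

-- B scans haystack once, filtering candidate starts by the first token and verifying
-- token-by-token with early exit, instead of A's per-position slice comparison.


-- ===== PORT A =====
-- for start in range(...): if haystack[start : start+window] == needle: return True
def aLoop (n hs : List String) : List Int → Bool
  | [] => false
  | s :: rest =>
    if PySem.List.slice hs (some s) (some (s + (n.length : Int))) == n then true
    else aLoop n hs rest

def tokens_are_subsequence_py (needle_tokens : List String) (haystack_tokens : List String) : Bool :=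
  if needle_tokens.isEmpty || decide (haystack_tokens.length < needle_tokens.length) then false
  else
    aLoop needle_tokens haystack_tokens
      (PySem.List.pyRange 0 ((haystack_tokens.length : Int) - (needle_tokens.length : Int) + 1) 1)

-- ===== PORT B =====
-- inner while: j = 1; while j < w and start + j < m and haystack[start+j] == needle[j]: j += 1; then j == w
def bInner (n hs : List String) (start j : Nat) : Bool :=
  if j < n.length then
    if start + j < hs.length && (hs.getD (start + j) "" == n.getD j "") then
      bInner n hs start (j + 1)
    else decide (j = n.length)
  else decide (j = n.length)
termination_by n.length - j

-- for start, tok in enumerate(haystack): if tok != first: continue; …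
def bOuter (n hs : List String) : Nat → List String → Bool
  | _, [] => false
  | start, tok :: rest =>
    if tok == n.getD 0 "" then
      if bInner n hs start 1 then true else bOuter n hs (start + 1) rest
    else bOuter n hs (start + 1) rest

def tokens_are_subsequence_py_alt (needle_tokens : List String) (haystack_tokens : List String) : Bool :=
  if needle_tokens.isEmpty then false
  else bOuter needle_tokens haystack_tokens 0 haystack_tokens

-- ===== PRECONDITION & SPEC =====
def Spec_tokens_are_subsequence_py (needle_tokens : List String) (haystack_tokens : List String) (out : Bool) : Prop := out = tokens_are_subsequence_py_alt needle_tokens haystack_tokens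
instance (needle_tokens : List String) (haystack_tokens : List String) (out : Bool) : Decidable (Spec_tokens_are_subsequence_py needle_tokens haystack_tokens out) := by unfold Spec_tokens_are_subsequence_py; infer_instance

-- ===== CLAIM (what is proved, stated in full; the proofs are below) =====
def Claim_equal_tokens_are_subsequence_py : Prop := ∀ (needle_tokens : List String) (haystack_tokens : List String), Dom_tokens_are_subsequence_py needle_tokens haystack_tokens → Spec_tokens_are_subsequence_py needle_tokens haystack_tokens (tokens_are_subsequence_py needle_tokens haystack_tokens)

-- ===== LEMMAS AND PROOFS =====

-- a full match of n at position s, stated index-wise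
def FullAt (n hs : List String) (s : Nat) : Prop :=
  ∀ k < n.length, s + k < hs.length ∧ hs.getD (s + k) "" = n.getD k ""

lemma seg_iff (n hs : List String) (s : Nat) (hn : n ≠ []) :
    (hs.drop s).take n.length = n ↔ FullAt n hs s := by
  constructor
  · intro h
    have hlen : ((hs.drop s).take n.length).length = n.length := by rw [h]
    have hml : min n.length (hs.length - s) = n.length := by
      simpa [List.length_take, List.length_drop] using hlen
    have hw : 0 < n.length := List.length_pos_iff.mpr hn
    have hsw : s + n.length ≤ hs.length := by
      rw [Nat.min_def] at hml; split_ifs at hml <;> omega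
    intro k hk
    refine ⟨by omega, ?_⟩
    have hk2 : s + k < hs.length := by omega
    have : ((hs.drop s).take n.length)[k]'(by simpa [List.length_take, List.length_drop, hml] using hk) = n[k]'hk := by
      simp [h]
    rw [List.getElem_take, List.getElem_drop] at this
    rw [List.getD_eq_getElem hs "" hk2, List.getD_eq_getElem n "" hk]
    exact this
  · intro h
    have hw : 0 < n.length := List.length_pos_iff.mpr hn
    have hend : s + n.length ≤ hs.length := by
      have := (h (n.length - 1) (by omega)).1
      omega
    apply List.ext_getElem
    · simp [List.length_take, List.length_drop]; omega
    · intro k hk1 hk2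
      have hk : k < n.length := hk2
      have := (h k hk).2
      rw [List.getD_eq_getElem hs "" (by omega), List.getD_eq_getElem n "" hk] at this
      rw [List.getElem_take, List.getElem_drop]
      exact this

lemma aLoop_eq_any (n hs : List String) (l : List Int) :
    aLoop n hs l = l.any (fun s => PySem.List.slice hs (some s) (some (s + (n.length : Int))) == n) := by
  induction l with
  | nil => rfl
  | cons s rest ih =>
    simp only [aLoop, List.any_cons]
    split_ifs with h <;> simp [h, ih]

lemma A_iff (n hs : List String) :
    tokens_are_subsequence_py n hs = true ↔ (n ≠ [] ∧ ∃ s : Nat, (hs.drop s).take n.length = n) := by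
  unfold tokens_are_subsequence_py
  by_cases hn : n = []
  · simp [hn]
  · have hw : 0 < n.length := List.length_pos_iff.mpr hn
    by_cases hm : hs.length < n.length
    · rw [if_pos (by simp [hm])]
      simp only [Bool.false_eq_true, false_iff]
      rintro ⟨-, s, hseg⟩
      have hlen : ((hs.drop s).take n.length).length = n.length := by rw [hseg]
      simp only [List.length_take, List.length_drop] at hlen
      rw [Nat.min_def] at hlen; split_ifs at hlen <;> omega
    · rw [if_neg (by simp [List.isEmpty_iff, hn, hm])]
      rw [aLoop_eq_any, List.any_eq_true]
      constructor
      · rintro ⟨s, hmem, hbeq⟩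
        rw [PySem.List.mem_pyRange_one] at hmem
        obtain ⟨h0, hlt⟩ := hmem
        refine ⟨hn, s.toNat, ?_⟩
        have hs' : (s.toNat : Int) = s := Int.toNat_of_nonneg h0
        rw [← hs', PySem.List.slice_natCast_add] at hbeq
        exact beq_iff_eq.mp hbeq
      · rintro ⟨-, s, hseg⟩
        have hlen : ((hs.drop s).take n.length).length = n.length := by rw [hseg]
        simp only [List.length_take, List.length_drop] at hlen
        have hend : s + n.length ≤ hs.length := by
          rw [Nat.min_def] at hlen; split_ifs at hlen <;> omega
        refine ⟨(s : Int), ?_, ?_⟩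
        · rw [PySem.List.mem_pyRange_one]
          constructor
          · positivity
          · omega
        · rw [PySem.List.slice_natCast_add]
          exact beq_iff_eq.mpr hseg

lemma bInner_iff (n hs : List String) (start j : Nat) :
    j ≤ n.length →
    (bInner n hs start j = true ↔
      ∀ k, j ≤ k → k < n.length → (start + k < hs.length ∧ hs.getD (start + k) "" = n.getD k "")) := by
  fun_induction bInner n hs start j with
  | case1 j hj hcond ih =>
    intro hle
    rw [ih (by omega)]
    simp only [Bool.and_eq_true, decide_eq_true_eq, beq_iff_eq] at hcond
    constructor
    · intro h k hk1 hk2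
      rcases Nat.eq_or_lt_of_le hk1 with rfl | hlt
      · exact hcond
      · exact h k hlt hk2
    · intro h k hk1 hk2
      exact h k (by omega) hk2
  | case2 j hj hcond =>
    intro hle
    constructor
    · intro h
      simp [show j ≠ n.length by omega] at h
    · intro h
      exact absurd ((by simpa using h j le_rfl hj : _)) (by simpa using hcond)
  | case3 j hj =>
    intro hle
    have : j = n.length := by omega
    simp only [this, decide_eq_true_eq, true_iff]
    intro k hk1 hk2; omega

lemma bOuter_iff (n hs : List String) (hn : n ≠ []) :
    ∀ (rest : List String) (start : Nat), hs.drop start = rest →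
    (bOuter n hs start rest = true ↔ ∃ t, start ≤ t ∧ FullAt n hs t) := by
  have hw : 0 < n.length := List.length_pos_iff.mpr hn
  intro rest
  induction rest with
  | nil =>
    intro start h
    simp only [bOuter, Bool.false_eq_true, false_iff]
    rintro ⟨t, ht, hfull⟩
    have hlen : hs.length ≤ start := by
      have := List.drop_eq_nil_iff.mp h; omega
    have := (hfull 0 hw).1
    omega
  | cons tok rest' ih =>
    intro start h
    have hstart : start < hs.length := by
      by_contra hge
      rw [List.drop_eq_nil_of_le (by omega)] at h
      simp at h
    have htok : hs.getD start "" = tok := by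
      have h0 : hs[start]? = some tok := by
        have h1 : (hs.drop start)[0]? = some tok := by rw [h]; rfl
        rwa [List.getElem?_drop, Nat.add_zero] at h1
      simp [List.getD_eq_getElem?_getD, h0]
    have hdrop' : hs.drop (start + 1) = rest' := by
      have : (hs.drop start).tail = rest' := by rw [h]; rfl
      rwa [List.tail_drop] at this
    have hfull_start : FullAt n hs start ↔
        (tok = n.getD 0 "" ∧ bInner n hs start 1 = true) := by
      rw [bInner_iff n hs start 1 (by omega)]
      constructor
      · intro hf
        refine ⟨by rw [← htok]; simpa using (hf 0 hw).2, fun k hk1 hk2 => hf k hk2⟩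
      · rintro ⟨he, hrest⟩ k hk
        rcases Nat.eq_zero_or_pos k with rfl | hkpos
        · exact ⟨by omega, by rw [Nat.add_zero, htok, he]⟩
        · exact hrest k (by omega) hk
    simp only [bOuter]
    by_cases he : tok = n.getD 0 ""
    · simp only [he, beq_self_eq_true, if_true]
      by_cases hb : bInner n hs start 1 = true
      · simp only [hb, if_true, true_iff]
        exact ⟨start, le_rfl, hfull_start.mpr ⟨he, hb⟩⟩
      · simp only [hb, if_false, Bool.false_eq_true]
        rw [ih (start + 1) hdrop']
        constructor
        · rintro ⟨t, ht, hf⟩; exact ⟨t, by omega, hf⟩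
        · rintro ⟨t, ht, hf⟩
          rcases Nat.eq_or_lt_of_le ht with rfl | hlt
          · exact absurd (hfull_start.mp hf).2 hb
          · exact ⟨t, by omega, hf⟩
    · simp only [show (tok == n.getD 0 "") = false by simpa using he, Bool.false_eq_true, if_false]
      rw [ih (start + 1) hdrop']
      constructor
      · rintro ⟨t, ht, hf⟩; exact ⟨t, by omega, hf⟩
      · rintro ⟨t, ht, hf⟩
        rcases Nat.eq_or_lt_of_le ht with rfl | hlt
        · exact absurd (hfull_start.mp hf).1 he
        · exact ⟨t, by omega, hf⟩

lemma B_iff (n hs : List String) :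
    tokens_are_subsequence_py_alt n hs = true ↔ (n ≠ [] ∧ ∃ s : Nat, (hs.drop s).take n.length = n) := by
  unfold tokens_are_subsequence_py_alt
  by_cases hn : n = []
  · simp [hn]
  · rw [if_neg (by simp [hn])]
    simp only [ne_eq, hn, not_false_eq_true, true_and]
    rw [bOuter_iff n hs hn hs 0 (by simp)]
    constructor
    · rintro ⟨t, -, hf⟩; exact ⟨t, (seg_iff n hs t hn).mpr hf⟩
    · rintro ⟨s, hseg⟩; exact ⟨s, Nat.zero_le s, (seg_iff n hs s hn).mp hseg⟩

-- ===== VERDICT (by name: the statement is the Claim_ definition above) =====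
theorem tokens_are_subsequence_py_spec : Claim_equal_tokens_are_subsequence_py := by
  intro n hs _
  unfold Spec_tokens_are_subsequence_py
  have h := (A_iff n hs).trans (B_iff n hs).symm
  cases hA : tokens_are_subsequence_py n hs
  · cases hB : tokens_are_subsequence_py_alt n hs
    · rfl
    · rw [hA, hB] at h; simp at h
  · cases hB : tokens_are_subsequence_py_alt n hs
    · rw [hA, hB] at h; simp at h
    · rfl
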